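-- pv_equiv track=rewrite | github.com/Hcroaker/ca_1 | main.py | recursiveFuntion
-- ===== SOURCE A (Python) =====
-- def recursiveFuntion(seq,words):
--     if(len(words)==0):
--         return seq
--     else:
--         for word in words:
--             seq.append(words.pop())
--             recursiveFuntion(seq,words)
--             return seq
-- ===== SOURCE B (Python) =====
-- def recursiveFuntion(seq, words):
--     for _ in range(len(words)):
--         seq.append(words.pop())
--     return seq
-- ===== Notes on version B (the rewrite author's own statement) =====
-- stated objective: simpler
-- what changed: The tail recursion with its once-entered for loop is replaced by a single flat loop that pops each word and appends it, with no recursion and no conditionals.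
import Mathlib
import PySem

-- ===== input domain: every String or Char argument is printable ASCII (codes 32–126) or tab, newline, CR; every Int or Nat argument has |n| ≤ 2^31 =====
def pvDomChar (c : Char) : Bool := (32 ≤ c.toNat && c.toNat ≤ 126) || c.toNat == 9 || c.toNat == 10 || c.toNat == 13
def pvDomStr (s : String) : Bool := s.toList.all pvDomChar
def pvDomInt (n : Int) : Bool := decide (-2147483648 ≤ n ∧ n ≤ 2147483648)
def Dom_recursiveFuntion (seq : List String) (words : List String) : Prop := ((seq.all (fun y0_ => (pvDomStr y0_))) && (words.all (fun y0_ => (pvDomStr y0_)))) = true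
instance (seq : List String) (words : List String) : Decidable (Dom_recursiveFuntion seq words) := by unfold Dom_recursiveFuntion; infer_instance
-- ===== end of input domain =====

-- B replaces the recursion (whose for loop only ever runs one iteration before returning)
-- by one flat pop-and-append loop; objective: simpler. Both Pythons mutate seq and words in
-- place (seq gains the reversed words, words is emptied); the theorems here are about the
-- RETURN value only.

-- ===== PORT A =====
-- A: if words empty return seq; else enter the for loop, whose first iteration pops the
-- last word, appends it to seq, recurses (words now shorter) and returns seq.
def recursiveFuntion (seq : List String) (words : List String) : List String :=
  if words.length = 0 then seq
  else
    match h : PySem.List.pop? words with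
    | some (x, rest) => recursiveFuntion (seq ++ [x]) rest
    | none => seq    -- unreachable: words ≠ []
termination_by words.length
decreasing_by
  rw [← PySem.List.length_of_pop?_eq_some _ h]
  exact Nat.lt_succ_self _

-- ===== PORT B =====
-- B: for _ in range(len(words)): seq.append(words.pop()); return seq
def recursiveFuntion_alt (seq : List String) (words : List String) : List String :=
  ((PySem.List.pyRange 0 (words.length : Int) 1).foldl
    (fun (st : List String × List String) _ =>
      match PySem.List.pop? st.2 with
      | some (x, rest) => (st.1 ++ [x], rest)
      | none => st)    -- unreachable inside the loop
    (seq, words)).1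

-- ===== PRECONDITION & SPEC =====
def Spec_recursiveFuntion (seq : List String) (words : List String) (out : List String) : Prop := out = recursiveFuntion_alt seq words
instance (seq : List String) (words : List String) (out : List String) : Decidable (Spec_recursiveFuntion seq words out) := by unfold Spec_recursiveFuntion; infer_instance

-- ===== CLAIM (what is proved, stated in full; the proofs are below) =====
def Claim_equal_recursiveFuntion : Prop := ∀ (seq : List String) (words : List String), Dom_recursiveFuntion seq words → Spec_recursiveFuntion seq words (recursiveFuntion seq words)

-- ===== LEMMAS AND PROOFS =====

theorem recursiveFuntion_eq (seq words : List String) :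
    recursiveFuntion seq words = seq ++ words.reverse := by
  induction words using List.reverseRecOn generalizing seq with
  | nil => rw [recursiveFuntion.eq_def]; simp
  | append_singleton ys x ih =>
    rw [recursiveFuntion.eq_def]
    rw [if_neg (by simp)]
    split
    · next x1 rest h =>
        rw [PySem.List.pop?_last] at h
        obtain ⟨rfl, rfl⟩ : x = x1 ∧ ys = rest := by simpa using h
        simp [ih]
    · next h =>
        rw [PySem.List.pop?_last] at h
        cases h

theorem alt_fold_eq (l : List Int) (s w : List String) (h : l.length = w.length) :
    (l.foldl
      (fun (st : List String × List String) _ =>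
        match PySem.List.pop? st.2 with
        | some (x, rest) => (st.1 ++ [x], rest)
        | none => st)
      (s, w)).1 = s ++ w.reverse := by
  induction l generalizing s w with
  | nil =>
    have : w = [] := by simpa using (List.length_eq_zero_iff.mp h.symm)
    simp [this]
  | cons a as ih =>
    rcases w.eq_nil_or_concat with rfl | ⟨ys, x, rfl⟩
    · simp at h
    · simp only [List.concat_eq_append, List.foldl_cons, PySem.List.pop?_last]
      have hlen : as.length = ys.length := by
        simp at h; omega
      rw [ih _ _ hlen]
      simp

theorem recursiveFuntion_alt_eq (seq words : List String) :
    recursiveFuntion_alt seq words = seq ++ words.reverse := by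
  unfold recursiveFuntion_alt
  exact alt_fold_eq _ _ _ (by simp [PySem.List.length_pyRange_one])

-- ===== VERDICT (by name: the statement is the Claim_ definition above) =====
theorem recursiveFuntion_spec : Claim_equal_recursiveFuntion := by
  intro seq words _
  unfold Spec_recursiveFuntion
  rw [recursiveFuntion_eq, recursiveFuntion_alt_eq]
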